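-- pv_equiv track=rewrite | github.com/ereezyy/AgentSystem | AgentSystem/customer_feedback/feedback_engine.py | _estimate_implementation_complexity
-- ===== SOURCE A (Python) =====
-- def _estimate_implementation_complexity(request_data: dict) -> str:
--     """
--     Estimate implementation complexity for a feature.
--
--     Args:
--         request_data: Feature request data
--
--     Returns:
--         str: Complexity level (low, medium, high)
--     """
--     text = (request_data.get('title', '') + ' ' + request_data.get('description', '')).lower()
--
--     high_complexity_keywords = {'system', 'architecture', 'infrastructure', 'integration', 'api', 'database', 'core'}
--     medium_complexity_keywords = {'feature', 'functionality', 'module', 'component'}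
--
--     high_count = sum(1 for word in text.split() if word in high_complexity_keywords)
--     medium_count = sum(1 for word in text.split() if word in medium_complexity_keywords)
--
--     if high_count > 2:
--         return 'high'
--     elif medium_count > 1 or high_count > 0:
--         return 'medium'
--     return 'low'
-- ===== SOURCE B (Python) =====
-- def _estimate_implementation_complexity(request_data: dict) -> str:
--     """Estimate implementation complexity (low/medium/high) by a single
--     early-exiting pass over the words with two running counters."""
--     text = (request_data.get('title', '') + ' ' + request_data.get('description', '')).lower()
--
--     HIGH = {'system', 'architecture', 'infrastructure', 'integration', 'api', 'database', 'core'}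
--     MEDIUM = {'feature', 'functionality', 'module', 'component'}
--
--     high = 0
--     medium = 0
--     for word in text.split():
--         if word in HIGH:
--             high += 1
--             if high > 2:
--                 return 'high'   # counters only grow: the verdict is already decided
--         elif word in MEDIUM:
--             medium += 1
--     return 'medium' if (medium > 1 or high > 0) else 'low'
-- ===== Notes on version B (the rewrite author's own statement) =====
-- stated objective: alternative
-- what changed: B replaces A's two independent full scans of the word list by one single pass that keeps both counters in an accumulator and returns 'high' early as soon as the high counter exceeds 2 (classification happens inside the loop, not after staged counting).
import Mathlib
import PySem

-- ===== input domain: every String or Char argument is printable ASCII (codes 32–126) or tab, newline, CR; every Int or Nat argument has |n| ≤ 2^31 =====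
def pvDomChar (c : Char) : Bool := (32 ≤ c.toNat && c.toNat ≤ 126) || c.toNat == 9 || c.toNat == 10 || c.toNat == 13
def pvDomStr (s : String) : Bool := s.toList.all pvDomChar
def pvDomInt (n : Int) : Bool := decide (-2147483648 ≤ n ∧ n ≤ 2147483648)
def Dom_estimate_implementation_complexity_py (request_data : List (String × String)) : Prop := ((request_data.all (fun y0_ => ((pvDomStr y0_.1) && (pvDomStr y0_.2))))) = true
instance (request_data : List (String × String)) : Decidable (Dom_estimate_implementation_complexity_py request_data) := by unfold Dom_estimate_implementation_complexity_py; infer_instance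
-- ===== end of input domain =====

-- B classifies in ONE early-exiting pass with two running counters instead of A's two staged full scans; same result.

-- ===== PORT A =====
def pvHighSet : PySem.Set String :=
  PySem.Set.ofList ["system", "architecture", "infrastructure", "integration", "api", "database", "core"]

def pvMediumSet : PySem.Set String :=
  PySem.Set.ofList ["feature", "functionality", "module", "component"]

def estimate_implementation_complexity_py (request_data : List (String × String)) : String :=
  let d := PySem.Dict.mk request_data
  let text := PySem.Str.lower (d.getD "title" "" ++ " " ++ d.getD "description" "")
  -- sum(1 for word in text.split() if word in keywords): a 0/1-sum is countP
  let high_count : Int := (((PySem.Str.split₀ text).countP (fun w => pvHighSet.contains w) : Nat) : Int)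
  let medium_count : Int := (((PySem.Str.split₀ text).countP (fun w => pvMediumSet.contains w) : Nat) : Int)
  if high_count > 2 then "high"
  else if medium_count > 1 ∨ high_count > 0 then "medium"
  else "low"

-- ===== PORT B =====
-- the for-loop with its two counters and the early 'return high'
def pvClassify : List String → Int → Int → String
  | [], high, medium => if medium > 1 ∨ high > 0 then "medium" else "low"
  | w :: ws, high, medium =>
    if pvHighSet.contains w then
      if high + 1 > 2 then "high"
      else pvClassify ws (high + 1) medium
    else if pvMediumSet.contains w then pvClassify ws high (medium + 1)
    else pvClassify ws high medium

def estimate_implementation_complexity_py_alt (request_data : List (String × String)) : String :=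
  let d := PySem.Dict.mk request_data
  let text := PySem.Str.lower (d.getD "title" "" ++ " " ++ d.getD "description" "")
  pvClassify (PySem.Str.split₀ text) 0 0

-- ===== PRECONDITION & SPEC =====
def Spec_estimate_implementation_complexity_py (request_data : List (String × String)) (out : String) : Prop := out = estimate_implementation_complexity_py_alt request_data
instance (request_data : List (String × String)) (out : String) : Decidable (Spec_estimate_implementation_complexity_py request_data out) := by unfold Spec_estimate_implementation_complexity_py; infer_instance

-- ===== CLAIM (what is proved, stated in full; the proofs are below) =====
def Claim_equal_estimate_implementation_complexity_py : Prop := ∀ (request_data : List (String × String)), Dom_estimate_implementation_complexity_py request_data → Spec_estimate_implementation_complexity_py request_data (estimate_implementation_complexity_py request_data)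

-- ===== LEMMAS AND PROOFS =====

-- the two keyword sets are disjoint, so B's elif never hides a medium word
theorem pv_disjoint (w : String) (h : pvHighSet.contains w = true) :
    pvMediumSet.contains w = false := by
  have hw : w ∈ (["system", "architecture", "infrastructure", "integration", "api", "database", "core"] : List String) := by
    simpa [pvHighSet, PySem.Set.contains, PySem.Set.ofList, PySem.Set.add, PySem.Set.empty] using h
  fin_cases hw <;> decide

-- loop invariant: pvClassify with accumulated counters equals A's staged verdict
theorem pv_inv (ws : List String) : ∀ (h m : Int), 0 ≤ h → h ≤ 2 → 0 ≤ m →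
    pvClassify ws h m =
      (if h + ((ws.countP (fun w => pvHighSet.contains w) : Nat) : Int) > 2 then "high"
       else if m + ((ws.countP (fun w => pvMediumSet.contains w) : Nat) : Int) > 1
              ∨ h + ((ws.countP (fun w => pvHighSet.contains w) : Nat) : Int) > 0 then "medium"
       else "low") := by
  induction ws with
  | nil =>
    intro h m _ h2 _
    simp only [pvClassify, List.countP_nil, Nat.cast_zero, add_zero]
    rw [if_neg (show ¬ h > 2 by omega)]
  | cons w ws ih =>
    intro h m h0 h2 m0
    by_cases hw : pvHighSet.contains w = true
    · have hm := pv_disjoint w hw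
      simp only [List.countP_cons, hw, hm, pvClassify, Bool.false_eq_true,
                 if_true, if_false, Nat.add_zero]
      by_cases hlim : h + 1 > 2
      · rw [if_pos hlim, if_pos (by push_cast; omega)]
      · rw [if_neg hlim, ih (h + 1) m (by omega) (by omega) m0]
        have e : h + (((ws.countP (fun w => pvHighSet.contains w)) + 1 : Nat) : Int)
            = (h + 1) + ((ws.countP (fun w => pvHighSet.contains w) : Nat) : Int) := by
          push_cast; ring
        rw [e]
    · rw [Bool.not_eq_true] at hw
      simp only [List.countP_cons, pvClassify, hw, Bool.false_eq_true,
                 if_true, if_false, Nat.add_zero]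
      by_cases hmw : pvMediumSet.contains w = true
      · simp only [hmw, if_true]
        rw [ih h (m + 1) h0 h2 (by omega)]
        have e : m + (((ws.countP (fun w => pvMediumSet.contains w)) + 1 : Nat) : Int)
            = (m + 1) + ((ws.countP (fun w => pvMediumSet.contains w) : Nat) : Int) := by
          push_cast; ring
        rw [e]
      · rw [Bool.not_eq_true] at hmw
        simp only [hmw, Bool.false_eq_true, if_false, Nat.add_zero]
        exact ih h m h0 h2 m0

-- ===== VERDICT (by name: the statement is the Claim_ definition above) =====
theorem estimate_implementation_complexity_py_spec : Claim_equal_estimate_implementation_complexity_py := by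
  intro request_data _
  unfold Spec_estimate_implementation_complexity_py
  unfold estimate_implementation_complexity_py estimate_implementation_complexity_py_alt
  rw [pv_inv _ 0 0 le_rfl (by norm_num) le_rfl]
  simp only [zero_add]
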